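-- pv_equiv track=rewrite | github.com/kk98033/UVa-Python | 11121.py | solve
-- ===== SOURCE A (Python) =====
-- def solve(n):
--     if n == 0:
--         return '0'
--
--     result = ''
--     while n != 0:
--         remainder = n % -2
--
--         n = n // -2
--
--         if remainder < 0:
--             remainder += 2
--             n += 1
--
--         result = str(remainder) + result
--
--     return result
-- ===== SOURCE B (Python) =====
-- def solve(n):
--     if n == 0:
--         return '0'
--     k = abs(n).bit_length() // 2 + 2
--     mask = 2 * (4 ** k - 1) // 3
--     return bin((n + mask) ^ mask)[2:]
-- ===== Notes on version B (the rewrite author's own statement) =====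
-- stated objective: alternative
-- what changed: Replaces A's per-digit loop (repeated %-2 and //-2 with remainder adjustment, prepending digit strings) by the closed-form negabinary mask trick: build an alternating-bit mask from n.bit_length(), compute (n+mask)^mask, and format that number once in binary.
import Mathlib
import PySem

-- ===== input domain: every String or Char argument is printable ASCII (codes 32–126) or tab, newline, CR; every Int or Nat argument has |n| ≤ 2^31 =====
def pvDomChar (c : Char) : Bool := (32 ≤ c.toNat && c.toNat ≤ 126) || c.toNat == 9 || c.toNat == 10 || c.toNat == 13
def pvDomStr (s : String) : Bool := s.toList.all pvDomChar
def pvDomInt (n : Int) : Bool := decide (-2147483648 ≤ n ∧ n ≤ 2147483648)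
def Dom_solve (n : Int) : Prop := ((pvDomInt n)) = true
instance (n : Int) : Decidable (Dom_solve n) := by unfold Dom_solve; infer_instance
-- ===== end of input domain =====

-- B replaces A's per-digit remainder-adjusting loop by the closed-form negabinary mask
-- trick ((n + mask) ^ mask with an alternating-bit mask), then formats once in binary.

-- termination measure for A's loop and its decrease lemma (cited by name in
-- decreasing_by; proved with small terms to keep the port's proof closure light)
def mu (m : Int) : Nat := (if m < 0 then 1 - 2*m else 2*m).toNat

lemma mu_lt {a b : Int}
    (ha : (if a < 0 then 1 - 2*a else 2*a) < (if b < 0 then 1 - 2*b else 2*b))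
    (hb : 0 < (if b < 0 then 1 - 2*b else 2*b)) : mu a < mu b := by
  unfold mu
  exact (Int.toNat_lt_toNat hb).mpr ha

lemma solveLoop_dec (n : Int) (h : ¬ n = 0) :
    mu (if PySem.Int.mod n (-2) < 0 then PySem.Int.floordiv n (-2) + 1
        else PySem.Int.floordiv n (-2)) < mu n := by
  have h1 := PySem.Int.floordiv_mul_add_mod n (-2)
  have h2 := PySem.Int.mod_neg_bounds n (b := -2) (by norm_num)
  have hr : PySem.Int.mod n (-2) = -1 ∨ PySem.Int.mod n (-2) = 0 := by
    rcases lt_or_ge (PySem.Int.mod n (-2)) 0 with hlt | hge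
    · exact Or.inl (le_antisymm (by linarith [Int.lt_iff_add_one_le.mp hlt])
        (by linarith [Int.lt_iff_add_one_le.mp h2.1]))
    · exact Or.inr (le_antisymm h2.2 hge)
  apply mu_lt
  · clear h2
    rcases hr with hr | hr <;> rw [hr] at h1 ⊢
    · rw [if_pos (by decide : ((-1:Int) < 0))]
      have hq := (lt_or_ge (PySem.Int.floordiv n (-2)) 0).imp Int.lt_iff_add_one_le.mp id
      generalize PySem.Int.floordiv n (-2) = q at h1 hq ⊢
      subst h1
      rcases hq with hq | hq <;> split_ifs <;> linarith
    · rw [if_neg (by decide : ¬((0:Int) < 0))]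
      generalize PySem.Int.floordiv n (-2) = q at h1 ⊢
      subst h1
      rcases lt_or_gt_of_ne h with h0 | h0 <;> split_ifs <;> linarith
  · rcases lt_or_ge n 0 with hn | hn
    · rw [if_pos hn]
      exact sub_pos.mpr (lt_trans (mul_neg_of_pos_of_neg two_pos hn) one_pos)
    · rw [if_neg (not_lt.mpr hn)]
      exact mul_pos two_pos (lt_of_le_of_ne hn (Ne.symm h))

-- ===== PORT A =====
-- literal port of A's while-loop: remainder = n % -2; n = n // -2; adjust; prepend digit
def solveLoop (n : Int) (result : String) : String :=
  if _h : n = 0 then result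
  else
    let remainder := PySem.Int.mod n (-2)
    let n1 := PySem.Int.floordiv n (-2)
    let remainder2 := if remainder < 0 then remainder + 2 else remainder
    let n2 := if remainder < 0 then n1 + 1 else n1
    solveLoop n2 (PySem.Int.toStr remainder2 ++ result)
termination_by mu n
decreasing_by exact solveLoop_dec n _h

def solve (n : Int) : String :=
  if n = 0 then "0" else solveLoop n ""

-- ===== PORT B =====
def solve_alt (n : Int) : String :=
  if n = 0 then "0"
  else
    let k := PySem.Int.bitLength n / 2 + 2
    let mask : Int := PySem.Int.floordiv (2 * (4 ^ k - 1)) 3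
    PySem.Int.toBin (PySem.Int.bxor (n + mask) mask)

-- ===== PRECONDITION & SPEC =====
def Spec_solve (n : Int) (out : String) : Prop := out = solve_alt n
instance (n : Int) (out : String) : Decidable (Spec_solve n out) := by unfold Spec_solve; infer_instance

-- ===== CLAIM (what is proved, stated in full; the proofs are below) =====
def Claim_equal_solve : Prop := ∀ (n : Int), Dom_solve n → Spec_solve n (solve n)

-- ===== LEMMAS AND PROOFS =====

-- the digit and next value of one iteration of A's loop
def stepR (n : Int) : Int :=
  if PySem.Int.mod n (-2) < 0 then PySem.Int.mod n (-2) + 2 else PySem.Int.mod n (-2)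
def stepN (n : Int) : Int :=
  if PySem.Int.mod n (-2) < 0 then PySem.Int.floordiv n (-2) + 1 else PySem.Int.floordiv n (-2)

lemma step_facts (n : Int) : n = -2 * stepN n + stepR n ∧ (stepR n = 0 ∨ stepR n = 1) := by
  have h1 := PySem.Int.floordiv_mul_add_mod n (-2)
  have h2 := PySem.Int.mod_neg_bounds n (b := -2) (by norm_num)
  unfold stepR stepN
  split_ifs <;> omega

lemma solveLoop_unfold (n : Int) (acc : String) (h : n ≠ 0) :
    solveLoop n acc = solveLoop (stepN n) (PySem.Int.toStr (stepR n) ++ acc) := by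
  rw [solveLoop]
  simp only [h, dite_false, stepN, stepR]

-- the value whose ordinary binary digits are A's negabinary digit string
def negaVal (n : Int) : Nat :=
  if n = 0 then 0 else 2 * negaVal (stepN n) + (stepR n).toNat
termination_by mu n
decreasing_by unfold stepN; exact solveLoop_dec n (by assumption)

lemma step_measure (n : Int) (h : n ≠ 0) :
    2 * (stepN n).natAbs + (if stepN n < 0 then 1 else 0) < 2 * n.natAbs + (if n < 0 then 1 else 0) := by
  have h1 := PySem.Int.floordiv_mul_add_mod n (-2)
  have h2 := PySem.Int.mod_neg_bounds n (b := -2) (by norm_num)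
  unfold stepN
  split_ifs <;> omega

lemma negaVal_unfold (n : Int) (h : n ≠ 0) :
    negaVal n = 2 * negaVal (stepN n) + (stepR n).toNat := by
  rw [negaVal]; simp [h]

lemma negaVal_ne_zero_aux (N : Nat) : ∀ n : Int,
    2 * n.natAbs + (if n < 0 then 1 else 0) ≤ N → n ≠ 0 → negaVal n ≠ 0 := by
  induction N with
  | zero => intro n hm h; omega
  | succ N ih =>
    intro n hm h
    rw [negaVal_unfold n h]
    obtain ⟨heq, hr⟩ := step_facts n
    by_cases hn2 : stepN n = 0
    · omega
    · have := ih (stepN n) (by have := step_measure n h; omega) hn2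
      omega

lemma negaVal_ne_zero (n : Int) (h : n ≠ 0) : negaVal n ≠ 0 :=
  negaVal_ne_zero_aux (2 * n.natAbs + (if n < 0 then 1 else 0)) n le_rfl h

-- binary digit list of a positive number (no leading zeros; empty for 0)
def binAux (m : Nat) : List Char :=
  if _h : m = 0 then [] else binAux (m / 2) ++ [(m % 2).digitChar]
decreasing_by exact Nat.div_lt_self (by omega) (by norm_num)

lemma binAux_step (m : Nat) (h : m ≠ 0) : binAux m = binAux (m / 2) ++ [(m % 2).digitChar] := by
  rw [binAux]; simp [h]

-- Nat.toDigits with base 2 computes binAux (for positive input)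
lemma toDigitsCore_two (fuel : Nat) : ∀ n ds, 0 < n → n < fuel →
    Nat.toDigitsCore 2 fuel n ds = binAux n ++ ds := by
  induction fuel with
  | zero => intro n ds h hf; omega
  | succ fuel ih =>
    intro n ds h hf
    rw [Nat.toDigitsCore.eq_def]
    dsimp only
    by_cases h2 : n / 2 = 0
    · rw [if_pos h2, binAux_step n (by omega), h2, binAux]
      simp
    · rw [if_neg h2, ih (n / 2) _ (by omega) (by omega), binAux_step n (by omega)]
      simp

lemma toDigits_two (m : Nat) (h : 0 < m) : Nat.toDigits 2 m = binAux m := by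
  unfold Nat.toDigits
  rw [toDigitsCore_two (m + 1) m [] h (by omega)]
  simp

-- the recursive alternating mask: M 0 = 0, M (k+1) = 4*M k + 2  (bits at odd positions)
def maskRec (k : Nat) : Nat :=
  match k with
  | 0 => 0
  | k + 1 => 4 * maskRec k + 2

lemma xor_even_even (a b : Nat) : (2*a) ^^^ (2*b) = 2*(a ^^^ b) := by
  have := Nat.bitwise_bit (f := bne) (a := false) (m := a) (b := false) (n := b) rfl
  simpa [Nat.bit, Nat.xor] using this

lemma xor_even_odd (a b : Nat) : (2*a) ^^^ (2*b+1) = 2*(a ^^^ b)+1 := by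
  have := Nat.bitwise_bit (f := bne) (a := false) (m := a) (b := true) (n := b) rfl
  simpa [Nat.bit, Nat.xor] using this

lemma xor_odd_even (a b : Nat) : (2*a+1) ^^^ (2*b) = 2*(a ^^^ b)+1 := by
  have := Nat.bitwise_bit (f := bne) (a := true) (m := a) (b := false) (n := b) rfl
  simpa [Nat.bit, Nat.xor] using this

lemma xor_odd_odd (a b : Nat) : (2*a+1) ^^^ (2*b+1) = 2*(a ^^^ b) := by
  have := Nat.bitwise_bit (f := bne) (a := true) (m := a) (b := true) (n := b) rfl
  simpa [Nat.bit, Nat.xor] using this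

-- the mask trick, both phases at once (P: even mask, Q: odd mask after one borrow)
lemma mask_trick (k : Nat) :
    (∀ n : Int, -(maskRec k : Int) ≤ 2*n → 2*n ≤ (maskRec k : Int) →
      ((n + (maskRec k : Int)).toNat ^^^ maskRec k) = negaVal n) ∧
    (∀ m : Int, -(maskRec k : Int) ≤ m → m ≤ (maskRec k : Int) + 1 →
      ((2*(maskRec k : Int) + 1 - m).toNat ^^^ (2 * maskRec k + 1)) = negaVal m) := by
  induction k with
  | zero =>
    constructor
    · intro n hl hu
      have hn : n = 0 := by simp [maskRec] at hl hu; omega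
      subst hn; simp [maskRec, negaVal]
    · intro m hl hu
      have : m = 0 ∨ m = 1 := by simp [maskRec] at hl hu; omega
      have hs1 : stepR 1 = 1 := by decide
      have hs2 : stepN 1 = 0 := by decide
      rcases this with hm | hm <;> subst hm
      · show ((2 * ((0:Nat):Int) + 1 - 0).toNat ^^^ (2 * 0 + 1)) = negaVal 0
        rw [negaVal]; decide
      · show ((2 * ((0:Nat):Int) + 1 - 1).toNat ^^^ (2 * 0 + 1)) = negaVal 1
        rw [negaVal_unfold 1 one_ne_zero, hs1, hs2, negaVal]
        decide
  | succ k ih =>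
    obtain ⟨ihP, ihQ⟩ := ih
    have hMrec : maskRec (k + 1) = 4 * maskRec k + 2 := rfl
    have hP : ∀ n : Int, -(maskRec (k+1) : Int) ≤ 2*n → 2*n ≤ (maskRec (k+1) : Int) →
        ((n + (maskRec (k+1) : Int)).toNat ^^^ maskRec (k+1)) = negaVal n := by
      intro n hl hu
      by_cases hn : n = 0
      · subst hn; simp [negaVal]
      · obtain ⟨heq, hr⟩ := step_facts n
        rw [negaVal_unfold n hn]
        set M := maskRec k with hM
        set n' := stepN n with hn'
        set r := stepR n with hrdef
        -- bounds on n'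
        have hb1 : -(M : Int) ≤ n' := by rw [hMrec] at hu; push_cast at hu ⊢; omega
        have hb2 : n' ≤ (M : Int) + 1 := by rw [hMrec] at hl; push_cast at hl ⊢; omega
        have hA : (0:Int) ≤ 2*(M:Int) + 1 - n' := by omega
        have hQ := ihQ n' hb1 hb2
        rcases hr with hr0 | hr1
        · have hsplit : (n + (maskRec (k+1) : Int)).toNat = 2 * ((2*(M:Int) + 1 - n').toNat) := by
            rw [hMrec]; push_cast; omega
          have hm2 : maskRec (k+1) = 2 * (2 * M + 1) := by rw [hMrec]; omega
          rw [hsplit, hm2, xor_even_even, hQ, hr0]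
          simp
        · have hsplit : (n + (maskRec (k+1) : Int)).toNat = 2 * ((2*(M:Int) + 1 - n').toNat) + 1 := by
            rw [hMrec]; push_cast; omega
          have hm2 : maskRec (k+1) = 2 * (2 * M + 1) := by rw [hMrec]; omega
          rw [hsplit, hm2, xor_odd_even, hQ, hr1]
          rfl
    refine ⟨hP, ?_⟩
    intro m hl hu
    by_cases hm : m = 0
    · subst hm
      have htn : (2 * ((maskRec (k+1) : Nat):Int) + 1 - 0).toNat = 2 * maskRec (k+1) + 1 := by
        omega
      rw [htn, Nat.xor_self, negaVal]
      simp
    · obtain ⟨heq, hr⟩ := step_facts m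
      rw [negaVal_unfold m hm]
      set m' := stepN m with hm'
      set r := stepR m with hrdef
      have hb1 : -(maskRec (k+1) : Int) ≤ 2*m' := by push_cast [hMrec] at hl hu ⊢; omega
      have hb2 : 2*m' ≤ (maskRec (k+1) : Int) := by push_cast [hMrec] at hl hu ⊢; omega
      have hPm := hP m' hb1 hb2
      rcases hr with hr0 | hr1
      · have hsplit : (2*(maskRec (k+1) : Int) + 1 - m).toNat
            = 2 * ((m' + (maskRec (k+1) : Int)).toNat) + 1 := by
          push_cast [hMrec] at hl hu ⊢; omega
        rw [hsplit, xor_odd_odd, hPm, hr0]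
        simp
      · have hsplit : (2*(maskRec (k+1) : Int) + 1 - m).toNat
            = 2 * ((m' + (maskRec (k+1) : Int)).toNat) := by
          push_cast [hMrec] at hl hu ⊢; omega
        rw [hsplit, xor_even_odd, hPm, hr1]
        rfl

-- A's loop accumulates exactly the binary digits of negaVal
lemma solveLoop_eq_aux (N : Nat) : ∀ n : Int, ∀ acc : String,
    2 * n.natAbs + (if n < 0 then 1 else 0) ≤ N → n ≠ 0 →
    solveLoop n acc = String.ofList (binAux (negaVal n)) ++ acc := by
  induction N with
  | zero => intro n acc hm h; omega
  | succ N ih =>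
    intro n acc hm h
    obtain ⟨heq, hr⟩ := step_facts n
    rw [solveLoop_unfold n acc h, negaVal_unfold n h]
    have hdig : String.ofList [((2 * negaVal (stepN n) + (stepR n).toNat) % 2).digitChar]
        = PySem.Int.toStr (stepR n) := by
      rcases hr with hr | hr <;> rw [hr]
      · have : (2 * negaVal (stepN n) + (0:Int).toNat) % 2 = 0 := by omega
        rw [this]; decide
      · have : (2 * negaVal (stepN n) + (1:Int).toNat) % 2 = 1 := by omega
        rw [this]; decide
    have hhalf : (2 * negaVal (stepN n) + (stepR n).toNat) / 2 = negaVal (stepN n) := by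
      rcases hr with hr | hr <;> rw [hr] <;> omega
    by_cases hn2 : stepN n = 0
    · have hr1 : stepR n = 1 := by omega
      have hnv0 : negaVal (0:Int) = 0 := by rw [negaVal]; simp
      rw [hn2, hr1, solveLoop, hnv0]
      simp only [reduceDIte]
      have hb1 : binAux (2 * 0 + (1:Int).toNat) = ['1'] := by
        rw [binAux_step _ (by omega)]
        have h0 : (2 * 0 + (1:Int).toNat) / 2 = 0 := by omega
        have h1 : (2 * 0 + (1:Int).toNat) % 2 = 1 := by omega
        rw [h0, h1, binAux]
        simp
        decide
      rw [hb1]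
      have hone : String.ofList ['1'] = PySem.Int.toStr 1 := by decide
      rw [hone]
    · have hne : 2 * negaVal (stepN n) + (stepR n).toNat ≠ 0 := by
        have := negaVal_ne_zero (stepN n) hn2; omega
      conv_rhs => rw [binAux_step _ hne]
      rw [hhalf, String.ofList_append, hdig,
        ih (stepN n) (PySem.Int.toStr (stepR n) ++ acc) (by have := step_measure n h; omega) hn2]
      simp [String.append_assoc]

lemma solveLoop_eq (n : Int) (h : n ≠ 0) :
    solveLoop n "" = String.ofList (binAux (negaVal n)) := by
  rw [solveLoop_eq_aux (2 * n.natAbs + (if n < 0 then 1 else 0)) n "" le_rfl h]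
  simp

-- the closed-form mask equals the recursive mask
lemma maskVal_eq (k : Nat) : PySem.Int.floordiv (2 * (4 ^ k - 1)) 3 = (maskRec k : Int) := by
  have h3 : (0:Int) < 3 := by norm_num
  rw [PySem.Int.floordiv_eq_ediv_of_pos h3]
  have key : ∀ j : Nat, (2 * ((4:Int) ^ j - 1)) = 3 * (maskRec j : Int) := by
    intro j
    induction j with
    | zero => simp [maskRec]
    | succ j ihj =>
      have : (4:Int) ^ (j+1) = 4 * 4 ^ j := by ring
      rw [this, maskRec]
      push_cast
      push_cast at ihj
      ring_nf
      ring_nf at ihj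
      omega
  rw [key k]
  omega

lemma maskRec_ge (k : Nat) (h : 1 ≤ k) : 2 ^ (2 * k - 1) ≤ maskRec k := by
  induction k with
  | zero => omega
  | succ k ih =>
    by_cases hk : k = 0
    · subst hk; decide
    · have h1 := ih (by omega)
      have h2 : 2 * (k + 1) - 1 = (2 * k - 1) + 2 := by omega
      rw [h2, pow_add, maskRec]
      omega

lemma mask_big (n : Int) : 2 * n.natAbs ≤ maskRec (PySem.Int.bitLength n / 2 + 2) := by
  set L := PySem.Int.bitLength n with hL
  have h1 : n.natAbs < 2 ^ L := PySem.Int.lt_two_pow_bitLength n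
  have h2 : 2 ^ (2 * (L / 2 + 2) - 1) ≤ maskRec (L / 2 + 2) := maskRec_ge _ (by omega)
  have h3 : L + 1 ≤ 2 * (L / 2 + 2) - 1 := by omega
  have h4 : (2:Nat) ^ (L + 1) ≤ 2 ^ (2 * (L / 2 + 2) - 1) := Nat.pow_le_pow_right (by norm_num) h3
  have h5 : 2 * n.natAbs < 2 ^ (L + 1) := by rw [pow_succ]; omega
  omega

-- ===== VERDICT (by name: the statement is the Claim_ definition above) =====
theorem solve_spec : Claim_equal_solve := by
  intro n _
  unfold Spec_solve solve solve_alt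
  by_cases hn : n = 0
  · simp [hn]
  · simp only [hn, if_false]
    set k := PySem.Int.bitLength n / 2 + 2 with hk
    rw [maskVal_eq k]
    have hbig : 2 * n.natAbs ≤ maskRec k := mask_big n
    have hnn : (0:Int) ≤ n + (maskRec k : Int) := by omega
    rw [PySem.Int.bxor_of_nonneg hnn (by exact_mod_cast Int.natCast_nonneg (maskRec k))]
    have hxor := (mask_trick k).1 n (by omega) (by omega)
    have hv : ((n + (maskRec k : Int)).toNat ^^^ ((maskRec k : Int)).toNat) = negaVal n := by
      simpa using hxor
    unfold PySem.Int.toBin PySem.Int.toBinChars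
    have hnz := negaVal_ne_zero n hn
    rw [if_neg (by simp)]
    rw [Int.toNat_natCast, hv, toDigits_two _ (by omega)]
    rw [solveLoop_eq n hn]
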